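-- pv_equiv track=rewrite | github.com/osainz59/Ask2Transformers | a2t/tasks/text_classification.py | _split_and_extend_labels_fn
-- ===== SOURCE A (Python) =====
-- from typing import Dict, List, Callable
--
-- def _split_and_extend_labels_fn(label: str) -> List[str]:
--     labels = [label] + [
--         partial_label.strip().capitalize()
--         for partial_label in label.split(",")
--         for partial_label in partial_label.split("and")
--         if len(partial_label.strip())
--     ]
--     return list(set(labels))
-- ===== SOURCE B (Python) =====
-- def _split_and_extend_labels_fn(label):
--     # Single character-level scan: emit a piece at each ',' or "and" boundary,
--     # strip/capitalize/dedupe inline; no split() calls, no staged passes.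
--     out = [label]
--     buf = []
--     i, n = 0, len(label)
--     while i <= n:
--         if i == n or label[i] == ',' or label.startswith("and", i):
--             piece = "".join(buf).strip().capitalize()
--             buf = []
--             if piece and piece not in out:
--                 out.append(piece)
--             i += 1 if i == n or label[i] == ',' else 3
--         else:
--             buf.append(label[i])
--             i += 1
--     return out
-- ===== Notes on version B (the rewrite author's own statement) =====
-- stated objective: alternative
-- what changed: A's two staged nested splits (comma first, then the conjunction word) feeding a comprehension and list(set(...)) are replaced by a single character-level scan with an explicit piece buffer: the string is traversed once, a piece is emitted at each delimiter boundary, and strip/capitalize/order-preserving dedup happen inline during the scan with no split() call at all.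
import Mathlib
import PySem

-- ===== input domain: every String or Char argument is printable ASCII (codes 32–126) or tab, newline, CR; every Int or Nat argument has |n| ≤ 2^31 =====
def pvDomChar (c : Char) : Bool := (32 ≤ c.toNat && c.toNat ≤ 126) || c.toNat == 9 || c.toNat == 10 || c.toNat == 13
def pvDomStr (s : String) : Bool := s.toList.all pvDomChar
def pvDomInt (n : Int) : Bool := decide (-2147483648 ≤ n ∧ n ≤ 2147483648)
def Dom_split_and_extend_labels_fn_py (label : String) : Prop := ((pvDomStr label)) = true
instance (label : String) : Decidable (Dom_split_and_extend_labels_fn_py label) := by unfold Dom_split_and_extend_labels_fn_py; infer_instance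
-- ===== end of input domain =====

-- B replaces A's staged nested splits (comma, then the conjunction word) feeding list(set(...)) by a single
-- character-level scan with an explicit piece buffer, emitting stripped/capitalized pieces and
-- deduplicating inline (alternative decomposition; same cost).

-- str.capitalize(), hand-ported (PySem has no capitalize): first char uppercased, rest lowered;
-- exact on the ASCII domain, where Python's titlecase of the first char is its uppercase.
def pyCapitalizeChars (cs : List Char) : List Char :=
  match cs with
  | [] => []
  | c :: t => PySem.Chars.upperChar c :: PySem.Chars.lower t

-- ===== PORT A =====
def split_and_extend_labels_fn_py (label : String) : List String :=
  let labels := [label] ++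
    ((PySem.Chars.splitOn label.toList [',']).flatMap fun partial_label =>
      (((PySem.Chars.splitOn partial_label ['a', 'n', 'd']).filter
          fun q => PySem.Chars.len (PySem.Chars.strip q) != 0).map
        fun q => String.ofList (pyCapitalizeChars (PySem.Chars.strip q))))
  PySem.Set.ofList labels

-- ===== PORT B =====
-- emit the buffered piece: strip, capitalize, append if non-empty and unseen
def altEmit (buf : List Char) (out : List String) : List String :=
  let pieceChars := pyCapitalizeChars (PySem.Chars.strip buf)
  let piece := String.ofList pieceChars
  if !pieceChars.isEmpty && !out.contains piece then out ++ [piece] else out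

-- the while loop of B: walk the remaining characters, cutting at ',' or "and"
def altLoop : List Char → List Char → List String → List String
  | [], buf, out => altEmit buf out
  | c :: t, buf, out =>
    if c = ',' then altLoop t [] (altEmit buf out)
    else if ['a', 'n', 'd'].isPrefixOf (c :: t) then altLoop (t.drop 2) [] (altEmit buf out)
    else altLoop t (buf ++ [c]) out
termination_by s => s.length
decreasing_by all_goals (simp; try omega)

def split_and_extend_labels_fn_py_alt (label : String) : List String :=
  altLoop label.toList [] [label]

-- ===== PRECONDITION & SPEC =====
def Spec_split_and_extend_labels_fn_py (label : String) (out : List String) : Prop := out = split_and_extend_labels_fn_py_alt label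
instance (label : String) (out : List String) : Decidable (Spec_split_and_extend_labels_fn_py label out) := by unfold Spec_split_and_extend_labels_fn_py; infer_instance

-- ===== CLAIM (what is proved, stated in full; the proofs are below) =====
def Claim_equal_split_and_extend_labels_fn_py : Prop := ∀ (label : String), Dom_split_and_extend_labels_fn_py label → Spec_split_and_extend_labels_fn_py label (split_and_extend_labels_fn_py label)

-- ===== LEMMAS AND PROOFS =====

-- prepend x onto the first piece of a nonempty piece list
def consHead (x : List Char) : List (List Char) → List (List Char)
  | [] => [x]
  | p :: ps => (x ++ p) :: ps

-- fuel-free reformulation of PySem.Chars.splitOn (exact for sep ≠ [])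
def cleanSplit (sep : List Char) : List Char → List (List Char)
  | [] => [[]]
  | c :: t =>
    if sep.isPrefixOf (c :: t) then [] :: cleanSplit sep (t.drop (sep.length - 1))
    else consHead [c] (cleanSplit sep t)
termination_by s => s.length
decreasing_by all_goals (simp; try omega)

-- split at every ',' and at every (leftmost-scan) "and", in one pass
def cleanT : List Char → List (List Char)
  | [] => [[]]
  | c :: t =>
    if c = ',' then [] :: cleanT t
    else if ['a', 'n', 'd'].isPrefixOf (c :: t) then [] :: cleanT (t.drop 2)
    else consHead [c] (cleanT t)
termination_by s => s.length
decreasing_by all_goals (simp; try omega)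

theorem consHead_cons (x p : List Char) (ps : List (List Char)) :
    consHead x (p :: ps) = (x ++ p) :: ps := rfl

theorem consHead_ne_nil (x : List Char) (l : List (List Char)) : consHead x l ≠ [] := by
  cases l <;> simp [consHead]

theorem cleanSplit_ne_nil (sep s : List Char) : cleanSplit sep s ≠ [] := by
  cases s with
  | nil => simp [cleanSplit]
  | cons c t =>
    rw [cleanSplit]
    split
    · simp
    · exact consHead_ne_nil _ _

theorem cleanT_ne_nil (s : List Char) : cleanT s ≠ [] := by
  cases s with
  | nil => simp [cleanT]
  | cons c t =>
    rw [cleanT]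
    split
    · simp
    · split
      · simp
      · exact consHead_ne_nil _ _

theorem consHead_consHead (x y : List Char) (l : List (List Char)) :
    consHead x (consHead y l) = consHead (x ++ y) l := by
  cases l <;> simp [consHead]

theorem consHead_nil_of_ne_nil (l : List (List Char)) (h : l ≠ []) : consHead [] l = l := by
  cases l with
  | nil => exact absurd rfl h
  | cons p ps => simp [consHead]

theorem consHead_append (x : List Char) (l m : List (List Char)) (h : l ≠ []) :
    consHead x l ++ m = consHead x (l ++ m) := by
  cases l with
  | nil => exact absurd rfl h
  | cons p ps => simp [consHead]

theorem splitOn_go_spec (sep : List Char) (hsep : sep ≠ []) :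
    ∀ (fuel : Nat) (s cur : List Char) (acc : List (List Char)), s.length ≤ fuel →
      PySem.Chars.splitOn.go sep fuel s cur acc = acc.reverse ++ consHead cur.reverse (cleanSplit sep s) := by
  intro fuel
  induction fuel with
  | zero =>
    intro s cur acc hs
    have : s = [] := by cases s <;> simp_all
    subst this
    simp [PySem.Chars.splitOn.go, cleanSplit, consHead]
  | succ f ih =>
    intro s cur acc hs
    cases s with
    | nil => simp [PySem.Chars.splitOn.go, cleanSplit, consHead]
    | cons c t =>
      rw [PySem.Chars.splitOn.go]
      by_cases hp : sep.isPrefixOf (c :: t) = true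
      · rw [if_pos hp]
        have hlen : 1 ≤ sep.length := by
          cases sep with
          | nil => exact absurd rfl hsep
          | cons _ _ => simp
        have hdrop : List.drop sep.length (c :: t) = t.drop (sep.length - 1) := by
          cases hs' : sep.length with
          | zero => omega
          | succ k => simp [List.drop_succ_cons]
        have hfuel : (List.drop sep.length (c :: t)).length ≤ f := by
          simp at hs ⊢; omega
        rw [ih _ _ _ hfuel, hdrop, cleanSplit, if_pos hp]
        have hnil := consHead_nil_of_ne_nil (cleanSplit sep (t.drop (sep.length - 1)))
          (cleanSplit_ne_nil _ _)
        simp [consHead_cons, hnil]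
      · rw [if_neg hp]
        have hfuel : t.length ≤ f := by simp at hs; omega
        rw [ih _ _ _ hfuel]
        rw [cleanSplit, if_neg hp, consHead_consHead]
        simp

theorem splitOn_comma_eq (s : List Char) :
    PySem.Chars.splitOn s [','] = cleanSplit [','] s := by
  rw [PySem.Chars.splitOn, splitOn_go_spec [','] (by simp) _ _ _ _ (by omega)]
  simp [consHead_nil_of_ne_nil _ (cleanSplit_ne_nil [','] s)]

theorem splitOn_and_eq (s : List Char) :
    PySem.Chars.splitOn s ['a', 'n', 'd'] = cleanSplit ['a', 'n', 'd'] s := by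
  rw [PySem.Chars.splitOn, splitOn_go_spec ['a','n','d'] (by simp) _ _ _ _ (by omega)]
  simp [consHead_nil_of_ne_nil _ (cleanSplit_ne_nil ['a','n','d'] s)]

theorem and_length_sub_one : (['a', 'n', 'd'] : List Char).length - 1 = 2 := rfl

theorem comma_not_prefix (c : Char) (t : List Char) (hc : ¬ c = ',') :
    ¬ ([','].isPrefixOf (c :: t) = true) := by
  simp [List.isPrefixOf]
  intro h
  exact hc h.symm

theorem comma_prefix (t : List Char) : [','].isPrefixOf (',' :: t) = true := by
  simp [List.isPrefixOf]

-- the head piece of a comma split is a prefix of the string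
theorem cleanSplit_head_prefix (s p : List Char) (ps : List (List Char))
    (h : cleanSplit [','] s = p :: ps) : p <+: s := by
  induction s generalizing p ps with
  | nil => simp [cleanSplit] at h; simp [h.1]
  | cons c t ih =>
    rw [cleanSplit] at h
    split at h
    · rw [List.cons_eq_cons] at h
      simp [← h.1]
    · rcases ht : cleanSplit [','] t with _ | ⟨q, qs⟩
      · exact absurd ht (cleanSplit_ne_nil _ _)
      · rw [ht, consHead_cons] at h
        obtain ⟨h1, _⟩ := List.cons_eq_cons.mp h
        rw [← h1]
        simp only [List.singleton_append]
        exact List.cons_prefix_cons.mpr ⟨rfl, ih q qs ht⟩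

-- flat-mapping the "and" split over the comma split is the one-pass combined split
theorem clean_flatMap (s : List Char) :
    (cleanSplit [','] s).flatMap (cleanSplit ['a', 'n', 'd']) = cleanT s := by
  cases s with
  | nil => simp [cleanSplit, cleanT]
  | cons c t =>
    rw [cleanT]
    by_cases hc : c = ','
    · rw [if_pos hc]
      subst hc
      rw [cleanSplit, if_pos (comma_prefix _)]
      simp only [List.flatMap_cons]
      have h0 : cleanSplit ['a','n','d'] ([] : List Char) = [[]] := by rw [cleanSplit]
      rw [h0]
      have := clean_flatMap t
      simp [this]
    · rw [if_neg hc]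
      by_cases hp : ['a', 'n', 'd'].isPrefixOf (c :: t) = true
      · rw [if_pos hp]
        obtain ⟨u, hu⟩ := List.isPrefixOf_iff_prefix.mp hp
        simp only [List.cons_append, List.nil_append] at hu
        obtain ⟨hc1, ht⟩ := List.cons_eq_cons.mp hu
        subst hc1
        subst ht
        have hdrop : (('n' :: 'd' :: u : List Char)).drop 2 = u := rfl
        rw [hdrop]
        have h1 : cleanSplit [','] ('a' :: 'n' :: 'd' :: u) =
            consHead ['a','n','d'] (cleanSplit [','] u) := by
          rw [cleanSplit, if_neg (comma_not_prefix _ _ (by decide))]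
          rw [cleanSplit, if_neg (comma_not_prefix _ _ (by decide))]
          rw [cleanSplit, if_neg (comma_not_prefix _ _ (by decide))]
          rw [consHead_consHead, consHead_consHead]
          rfl
        rw [h1]
        rcases hq : cleanSplit [','] u with _ | ⟨p, ps⟩
        · exact absurd hq (cleanSplit_ne_nil _ _)
        · rw [consHead_cons]
          simp only [List.flatMap_cons]
          have hA : cleanSplit ['a','n','d'] (['a','n','d'] ++ p) =
              [] :: cleanSplit ['a','n','d'] p := by
            rw [show (['a','n','d'] : List Char) ++ p = 'a' :: ('n' :: 'd' :: p) from rfl]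
            rw [cleanSplit, if_pos (by simp [List.isPrefixOf]), and_length_sub_one]
            rfl
          rw [hA]
          have ihu := clean_flatMap u
          rw [hq] at ihu
          simp only [List.flatMap_cons] at ihu
          simp only [List.cons_append]
          rw [ihu]
      · rw [if_neg hp]
        rw [cleanSplit, if_neg (comma_not_prefix c _ hc)]
        rcases hq : cleanSplit [','] t with _ | ⟨p, ps⟩
        · exact absurd hq (cleanSplit_ne_nil _ _)
        · rw [consHead_cons]
          simp only [List.flatMap_cons, List.singleton_append]
          have hnpA : ¬ (['a','n','d'].isPrefixOf (c :: p) = true) := by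
            intro hcp
            have h1 : (['a','n','d'] : List Char) <+: (c :: p) := List.isPrefixOf_iff_prefix.mp hcp
            have h2 : (c :: p) <+: (c :: t) :=
              List.cons_prefix_cons.mpr ⟨rfl, cleanSplit_head_prefix t p ps hq⟩
            exact hp (List.isPrefixOf_iff_prefix.mpr (h1.trans h2))
          have hcp : cleanSplit ['a','n','d'] (c :: p) =
              consHead [c] (cleanSplit ['a','n','d'] p) := by
            rw [cleanSplit, if_neg hnpA]
          rw [hcp, consHead_append _ _ _ (cleanSplit_ne_nil _ _)]
          have iht := clean_flatMap t
          rw [hq] at iht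
          simp only [List.flatMap_cons] at iht
          rw [iht]
termination_by s.length
decreasing_by all_goals (subst_vars; simp_all; try omega)

-- a comprehension's flatMap of per-piece filter+map is the filter+map of the flatMap
theorem flatMap_map_filter (l : List (List Char)) (h : List Char → List (List Char))
    (g : List Char → Bool) (f : List Char → String) :
    l.flatMap (fun p => ((h p).filter g).map f) = (((l.flatMap h).filter g).map f) := by
  induction l with
  | nil => simp
  | cons a l ih => simp [List.filter_append, ih]

-- emitting one piece is exactly A's filter+capitalize step folded as a set-insert
theorem altEmit_eq (p : List Char) (out : List String) :
    altEmit p out =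
      if (PySem.Chars.len (PySem.Chars.strip p) != 0)
      then PySem.Set.add out (String.ofList (pyCapitalizeChars (PySem.Chars.strip p)))
      else out := by
  rcases h : PySem.Chars.strip p with _ | ⟨a, l⟩
  · simp [altEmit, h, pyCapitalizeChars, PySem.Chars.len]
  · have hlen : (PySem.Chars.len (PySem.Chars.strip p) != 0) = true := by
      simp [h, PySem.Chars.len]
      omega
    rw [h] at hlen
    rw [if_pos hlen]
    simp only [altEmit, h, pyCapitalizeChars, List.isEmpty_cons, Bool.not_false, Bool.true_and]
    unfold PySem.Set.add PySem.Set.contains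
    by_cases hc : out.contains (String.ofList (PySem.Chars.upperChar a :: PySem.Chars.lower l)) = true
    · simp [hc]
    · simp only [Bool.not_eq_true] at hc
      simp [hc]

-- folding altEmit over a piece list
def pieceFold (ps : List (List Char)) (out : List String) : List String :=
  ps.foldl (fun o p => altEmit p o) out

-- B's scan processes exactly the pieces of the one-pass combined split
theorem altLoop_eq (s : List Char) : ∀ (buf : List Char) (out : List String),
    altLoop s buf out = pieceFold (consHead buf (cleanT s)) out := by
  cases s with
  | nil =>
    intro buf out
    simp [altLoop, cleanT, consHead, pieceFold]
  | cons c t =>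
    intro buf out
    rw [altLoop, cleanT]
    by_cases hc : c = ','
    · rw [if_pos hc, if_pos hc]
      rw [altLoop_eq t [] (altEmit buf out)]
      rw [consHead_nil_of_ne_nil _ (cleanT_ne_nil t)]
      simp [consHead_cons, pieceFold]
    · rw [if_neg hc, if_neg hc]
      by_cases hp : ['a', 'n', 'd'].isPrefixOf (c :: t) = true
      · rw [if_pos hp, if_pos hp]
        rw [altLoop_eq (t.drop 2) [] (altEmit buf out)]
        rw [consHead_nil_of_ne_nil _ (cleanT_ne_nil _)]
        simp [consHead_cons, pieceFold]
      · rw [if_neg hp, if_neg hp]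
        rw [altLoop_eq t (buf ++ [c]) out, consHead_consHead]
termination_by s.length
decreasing_by all_goals (simp; try omega)

-- folding altEmit = filter + map + foldl Set.add (A's comprehension then set)
theorem pieceFold_eq (ps : List (List Char)) (out : List String) :
    pieceFold ps out =
      ((ps.filter fun q => PySem.Chars.len (PySem.Chars.strip q) != 0).map
        fun q => String.ofList (pyCapitalizeChars (PySem.Chars.strip q))).foldl PySem.Set.add out := by
  induction ps generalizing out with
  | nil => simp [pieceFold]
  | cons p ps ih =>
    rw [pieceFold, List.foldl_cons, altEmit_eq]
    by_cases hg : (PySem.Chars.len (PySem.Chars.strip p) != 0) = true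
    · rw [if_pos hg]
      simp only [List.filter_cons, hg, if_true, List.map_cons, List.foldl_cons]
      exact ih _
    · rw [if_neg hg]
      have hg' : (PySem.Chars.len (PySem.Chars.strip p) != 0) = false := by
        simpa using hg
      simp only [List.filter_cons, hg', Bool.false_eq_true, if_false]
      exact ih _

-- ===== VERDICT (by name: the statement is the Claim_ definition above) =====
theorem split_and_extend_labels_fn_py_spec : Claim_equal_split_and_extend_labels_fn_py := by
  intro label _
  unfold Spec_split_and_extend_labels_fn_py
  simp only [split_and_extend_labels_fn_py, split_and_extend_labels_fn_py_alt]
  rw [altLoop_eq, consHead_nil_of_ne_nil _ (cleanT_ne_nil _), pieceFold_eq]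
  rw [PySem.Set.ofList_eq_foldl, List.foldl_append]
  have h1 : ([label] : List String).foldl PySem.Set.add [] = [label] := by
    simp [PySem.Set.add, PySem.Set.contains]
  rw [h1]
  congr 1
  rw [splitOn_comma_eq]
  simp only [splitOn_and_eq]
  rw [flatMap_map_filter, clean_flatMap]
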